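-- pv_equiv track=rewrite | github.com/olbogdan/Algorithms | Python/AlgoBootcamp/leetcode/medium/1239. Maximum Length of a Concatenated String with Unique Characters.py | createMasksArray
-- ===== SOURCE A (Python) =====
-- from typing import List
--
-- def createMasksArray(arr) -> List[set]:
--     result = set()
--     for string in arr:
--         candidate = 0
--         charRepeats = False
--         for c in string:
--             cMask = 1 << ord(c)
--             if cMask & candidate != 0:
--                 charRepeats = True
--                 break
--             candidate = candidate | cMask
--         if not charRepeats:
--             result.add(candidate)
--     return list(result)
-- ===== SOURCE B (Python) =====
-- from typing import List
--
-- def createMasksArray(arr) -> List[set]: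
--     result = set()
--     for string in arr:
--         cs = sorted(string)
--         if all(a != b for a, b in zip(cs, cs[1:])):
--             result.add(sum(1 << ord(c) for c in cs))
--     return list(result)
-- ===== Notes on version B (the rewrite author's own statement) =====
-- stated objective: alternative
-- what changed: Duplicate characters are detected by sorting each string and comparing adjacent pairs (sort-then-scan) instead of A's incremental bitmask membership test with an early break; the mask is then the sum of 1 << ord(c) over the sorted characters, which equals A's OR-accumulated mask because the characters are distinct.
import Mathlib
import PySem

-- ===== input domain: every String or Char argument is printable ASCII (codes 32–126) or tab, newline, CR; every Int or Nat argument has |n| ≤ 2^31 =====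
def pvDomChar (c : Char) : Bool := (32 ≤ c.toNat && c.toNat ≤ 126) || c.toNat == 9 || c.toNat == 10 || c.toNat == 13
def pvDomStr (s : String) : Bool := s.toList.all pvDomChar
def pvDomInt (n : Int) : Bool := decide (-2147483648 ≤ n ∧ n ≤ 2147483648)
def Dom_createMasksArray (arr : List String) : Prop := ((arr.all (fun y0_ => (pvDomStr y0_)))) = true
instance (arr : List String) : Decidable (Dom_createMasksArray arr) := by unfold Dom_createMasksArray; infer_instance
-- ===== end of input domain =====

-- B detects repeated characters by sorting each string and comparing adjacent pairs (sort-then-scan)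
-- instead of A's incremental bitmask membership test with an early break (objective: alternative);
-- return values proved equal.

-- ===== PORT A =====
-- inner 'for c in string' loop: state (candidate, charRepeats); the break returns with true
def pvMaskLoop : List Char → Int → Int × Bool
  | [], cand => (cand, false)
  | c :: cs, cand =>
    let cMask : Int := (1 : Int) <<< (c.toNat : Int)            -- 1 << ord(c)
    if PySem.Int.band cMask cand ≠ 0 then (cand, true)
    else pvMaskLoop cs (PySem.Int.bor cand cMask)

def createMasksArray (arr : List String) : List Int :=
  arr.foldl (fun result s =>
    let r := pvMaskLoop s.toList 0
    if !r.2 then PySem.Set.add result r.1 else result) PySem.Set.empty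

-- ===== PORT B =====
def createMasksArray_alt (arr : List String) : List Int :=
  arr.foldl (fun result s =>
    let cs := PySem.List.sorted s.toList (fun c => c) false          -- cs = sorted(string)
    -- all(a != b for a, b in zip(cs, cs[1:]))
    if (cs.zip (PySem.List.slice cs (some 1) none)).all (fun p => p.1 != p.2) then
      -- sum(1 << ord(c) for c in cs)
      PySem.Set.add result (cs.foldl (fun acc c => acc + (1 : Int) <<< (c.toNat : Int)) 0)
    else result) PySem.Set.empty

-- ===== PRECONDITION & SPEC =====
def Spec_createMasksArray (arr : List String) (out : List Int) : Prop := out = createMasksArray_alt arr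
instance (arr : List String) (out : List Int) : Decidable (Spec_createMasksArray arr out) := by unfold Spec_createMasksArray; infer_instance

-- ===== CLAIM (what is proved, stated in full; the proofs are below) =====
def Claim_equal_createMasksArray : Prop := ∀ (arr : List String), Dom_createMasksArray arr → Spec_createMasksArray arr (createMasksArray arr)

-- ===== LEMMAS AND PROOFS =====

lemma pv_lor_eq_add (m : Nat) : ∀ n, n &&& m = 0 → n ||| m = n + m := by
  induction m using Nat.binaryRec with
  | zero => simp
  | bit b m ih =>
    intro n h
    induction n using Nat.binaryRec with
    | zero => simp
    | bit c n _ =>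
      rw [Nat.land_bit] at h
      rw [Nat.lor_bit]
      rcases Nat.bit_eq_zero_iff.mp h with ⟨h1, h2⟩
      have := ih n h1
      cases c <;> cases b <;> simp_all [Nat.bit] <;> omega

lemma pv_one_shiftLeft (k : Nat) : (1 : Int) <<< (k : Int) = ((2 ^ k : Nat) : Int) :=
  Int.one_shiftLeft k

lemma pv_band_two_pow (n k : Nat) (h : n.testBit k = false) :
    PySem.Int.band ((1 : Int) <<< (k : Int)) (n : Int) = 0 := by
  rw [pv_one_shiftLeft, PySem.Int.band_natCast, Nat.two_pow_and, h]
  simp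

lemma pv_band_two_pow_ne (n k : Nat) (h : n.testBit k = true) :
    PySem.Int.band ((1 : Int) <<< (k : Int)) (n : Int) ≠ 0 := by
  rw [pv_one_shiftLeft, PySem.Int.band_natCast, Nat.two_pow_and, h]
  norm_num

lemma pv_bor_two_pow (n k : Nat) (h : n.testBit k = false) :
    PySem.Int.bor ((n : Int)) ((1 : Int) <<< (k : Int)) = ((n + 2 ^ k : Nat) : Int) := by
  rw [pv_one_shiftLeft, PySem.Int.bor_natCast]
  congr 1
  apply pv_lor_eq_add
  rw [Nat.and_two_pow, h]
  simp

lemma pv_nodup_map_toNat (cs : List Char) : (cs.map Char.toNat).Nodup ↔ cs.Nodup := by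
  rw [List.nodup_map_iff]
  intro a b h
  exact Char.ext (UInt32.toNat_inj.mp h)

lemma pvMaskLoop_false (cs : List Char) : ∀ n : Nat,
    (cs.map Char.toNat).Nodup → (∀ c ∈ cs, n.testBit c.toNat = false) →
    pvMaskLoop cs (n : Int) = (cs.foldl (fun acc c => acc + (1 : Int) <<< (c.toNat : Int)) (n : Int), false) := by
  induction cs with
  | nil => intro n _ _; simp [pvMaskLoop]
  | cons c cs ih =>
    intro n hnd hbits
    have hc : n.testBit c.toNat = false := hbits c (by simp)
    have hcnot : c.toNat ∉ cs.map Char.toNat := (List.nodup_cons.mp hnd).1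
    simp only [pvMaskLoop]
    rw [if_neg (by rw [pv_band_two_pow n c.toNat hc]; simp)]
    rw [pv_bor_two_pow n c.toNat hc]
    rw [ih (n + 2 ^ c.toNat) (List.nodup_cons.mp hnd).2]
    · have hcast : ((n + 2 ^ c.toNat : Nat) : Int) = (n : Int) + (1 : Int) <<< (c.toNat : Int) := by
        rw [pv_one_shiftLeft]; push_cast; ring
      rw [hcast, List.foldl_cons]
    · intro d hd
      have hsum : (n + 2 ^ c.toNat) = n ||| 2 ^ c.toNat := by
        symm; apply pv_lor_eq_add; rw [Nat.and_two_pow, hc]; simp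
      rw [hsum, Nat.testBit_lor, hbits d (by simp [hd]), Nat.testBit_two_pow]
      simp
      intro heq
      exact absurd (heq ▸ List.mem_map_of_mem hd) hcnot

lemma pvMaskLoop_true (cs : List Char) : ∀ n : Nat,
    ¬ ((cs.map Char.toNat).Nodup ∧ ∀ c ∈ cs, n.testBit c.toNat = false) →
    (pvMaskLoop cs (n : Int)).2 = true := by
  induction cs with
  | nil => intro n h; exfalso; exact h ⟨by simp, by simp⟩
  | cons c cs ih =>
    intro n h
    by_cases hc : n.testBit c.toNat = true
    · simp only [pvMaskLoop]
      rw [if_pos (pv_band_two_pow_ne n c.toNat hc)]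
    · have hc' : n.testBit c.toNat = false := by simpa using hc
      simp only [pvMaskLoop]
      rw [if_neg (by rw [pv_band_two_pow n c.toNat hc']; simp)]
      rw [pv_bor_two_pow n c.toNat hc']
      apply ih
      intro ⟨hnd2, hb2⟩
      have hsum : (n + 2 ^ c.toNat) = n ||| 2 ^ c.toNat := by
        symm; apply pv_lor_eq_add; rw [Nat.and_two_pow, hc']; simp
      apply h
      constructor
      · simp only [List.map_cons, List.nodup_cons]
        refine ⟨?_, hnd2⟩
        intro hmem
        rcases List.mem_map.mp hmem with ⟨d, hd, hde⟩
        have := hb2 d hd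
        rw [hsum, Nat.testBit_lor, Nat.testBit_two_pow, hde] at this
        simp at this
      · intro d hd
        rcases List.mem_cons.mp hd with rfl | hd'
        · exact hc'
        · have := hb2 d hd'
          rw [hsum, Nat.testBit_lor] at this
          exact (Bool.or_eq_false_iff.mp this).1

-- zip(cs, cs[1:]) all-distinct is exactly adjacent-distinct (IsChain)
lemma pv_zip_all_ne (cs : List Char) :
    ((cs.zip cs.tail).all (fun p => p.1 != p.2)) = true ↔ List.IsChain (· ≠ ·) cs := by
  induction cs with
  | nil => simp
  | cons a cs ih =>
    cases cs with
    | nil => simp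
    | cons b cs =>
      simp only [List.tail_cons, List.zip_cons_cons, List.all_cons, List.isChain_cons_cons,
        Bool.and_eq_true, bne_iff_ne, ne_eq] at ih ⊢
      tauto

lemma pv_isChain_and {α : Type} {R S : α → α → Prop} : ∀ l : List α,
    List.IsChain R l → List.IsChain S l → List.IsChain (fun a b => R a b ∧ S a b) l
  | [], _, _ => List.IsChain.nil
  | [_], _, _ => List.IsChain.singleton _
  | _ :: _ :: _, hR, hS => by
    rw [List.isChain_cons_cons] at *
    exact ⟨⟨hR.1, hS.1⟩, pv_isChain_and _ hR.2 hS.2⟩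

-- the sorted permutation has distinct adjacent pairs iff the original list has no duplicates
lemma pv_chain_iff_nodup (cs : List Char) :
    List.IsChain (· ≠ ·) (PySem.List.sorted cs (fun c => c) false) ↔ cs.Nodup := by
  have hperm := PySem.List.sorted_perm cs (fun c => c) false
  have hle : (PySem.List.sorted cs (fun c => c) false).Pairwise (· ≤ ·) :=
    PySem.List.sorted_pairwise cs (fun c => c)
  constructor
  · intro hch
    have hlt : List.IsChain (· < ·) (PySem.List.sorted cs (fun c => c) false) :=
      (pv_isChain_and _ hle.isChain hch).imp (fun a b h => lt_of_le_of_ne h.1 h.2)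
    have : (PySem.List.sorted cs (fun c => c) false).Pairwise (· < ·) :=
      List.isChain_iff_pairwise.mp hlt
    exact hperm.nodup_iff.mp (this.imp ne_of_lt)
  · intro hnd
    exact ((hperm.nodup_iff.mpr hnd).imp (fun h => h)).isChain

lemma pv_foldl_add {α : Type} (f : α → Int) (cs : List α) : ∀ x : Int,
    cs.foldl (fun acc c => acc + f c) x = x + (cs.map f).sum := by
  induction cs with
  | nil => intro x; simp
  | cons c cs ih => intro x; simp [ih]; ring

-- per-string step equality
lemma pv_step_eq (res : List Int) (s : String) :
    (let r := pvMaskLoop s.toList 0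
     if !r.2 then PySem.Set.add res r.1 else res)
    = (let cs := PySem.List.sorted s.toList (fun c => c) false
       if (cs.zip (PySem.List.slice cs (some 1) none)).all (fun p => p.1 != p.2) then
         PySem.Set.add res (cs.foldl (fun acc c => acc + (1 : Int) <<< (c.toNat : Int)) 0)
       else res) := by
  simp only [PySem.List.slice_from_one]
  have h0 : ((0 : Nat) : Int) = (0 : Int) := by norm_num
  rcases Decidable.em s.toList.Nodup with h | h
  · have hf := pvMaskLoop_false s.toList 0 ((pv_nodup_map_toNat s.toList).mpr h)
      (by intro c _; exact Nat.zero_testBit c.toNat)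
    rw [h0] at hf
    have hcond := (pv_chain_iff_nodup s.toList).mpr h
    rw [← pv_zip_all_ne] at hcond
    simp only [hf, hcond, if_true]
    have hperm := PySem.List.sorted_perm s.toList (fun c => c) false
    have hsum : ((PySem.List.sorted s.toList (fun c => c) false).map
        (fun c => (1 : Int) <<< (c.toNat : Int))).sum
        = (s.toList.map (fun c => (1 : Int) <<< (c.toNat : Int))).sum :=
      (hperm.map _).sum_eq
    rw [pv_foldl_add, pv_foldl_add, hsum]
    simp
  · have ht := pvMaskLoop_true s.toList 0
      (by intro hcon; exact h ((pv_nodup_map_toNat s.toList).mp hcon.1))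
    rw [h0] at ht
    have hcond : ¬ List.IsChain (· ≠ ·) (PySem.List.sorted s.toList (fun c => c) false) := by
      intro hc; exact h ((pv_chain_iff_nodup s.toList).mp hc)
    rw [← pv_zip_all_ne] at hcond
    simp [ht, hcond]

-- ===== VERDICT (by name: the statement is the Claim_ definition above) =====
theorem createMasksArray_spec : Claim_equal_createMasksArray := by
  intro arr _
  unfold Spec_createMasksArray createMasksArray createMasksArray_alt
  apply PySem.List.foldl_congr_mem
  intro acc s _
  exact pv_step_eq acc s
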